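-- pv_equiv track=rewrite | github.com/Pr-jasouli/python-DatasetStream-automation | ChannelSynthesizer/src/parsers/VOO_parser.py | split_long_line
-- ===== SOURCE A (Python) =====
-- VOO_info_codes = {
--     "VS": "VOOsport",
--     "w VS": "VOOsport World",
--     "Pa": "Bouquet Panorama",
--     "Ci": "Option Ciné Pass",
--     "Doc": "Be Bouquet Documentaires",
--     "Div": "Be Bouquet Divertissement",
--     "Co": "Be Cool",
--     "Enf": "Be Bouquet Enfant",
--     "Sp": "Be Bouquet Sport",
--     "Sel": "Be Bouquet Selection",
--     "Inf": "Option Infos",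
--     "Sen": "Option Sensation",
--     "Ch": "Option Charme",
--     "FF": "Family Fun",
--     "DM": "Discover More",
--     "CX": "Classé X",
--     "MX": "Man-X",
--     "B": "Bruxelles",
--     "G": "Comm. German",
--     "W": "Wallonie",
-- }
--
-- def split_long_line(line):
--     words = line.split()
--     new_lines = []
--     current_line = []
--
--     for i, word in enumerate(words):
--         current_line.append(word)
--         if word in VOO_info_codes and (i + 1 < len(words) and words[i + 1] not in VOO_info_codes):
--             new_lines.append(" ".join(current_line) + "\n")
--             current_line = []
--
--     if current_line:
--         new_lines.append(" ".join(current_line) + "\n")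
--
--     return new_lines
-- ===== SOURCE B (Python) =====
-- VOO_info_codes = {
--     "VS": "VOOsport",
--     "w VS": "VOOsport World",
--     "Pa": "Bouquet Panorama",
--     "Ci": "Option Ciné Pass",
--     "Doc": "Be Bouquet Documentaires",
--     "Div": "Be Bouquet Divertissement",
--     "Co": "Be Cool",
--     "Enf": "Be Bouquet Enfant",
--     "Sp": "Be Bouquet Sport",
--     "Sel": "Be Bouquet Selection",
--     "Inf": "Option Infos",
--     "Sen": "Option Sensation",
--     "Ch": "Option Charme",
--     "FF": "Family Fun",
--     "DM": "Discover More",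
--     "CX": "Classé X",
--     "MX": "Man-X",
--     "B": "Bruxelles",
--     "G": "Comm. German",
--     "W": "Wallonie",
-- }
--
-- def split_long_line(line):
--     words = line.split()
--     cuts = [i for i, w in enumerate(words)
--             if w in VOO_info_codes and i + 1 < len(words)
--             and words[i + 1] not in VOO_info_codes]
--     out = []
--     start = 0
--     for c in cuts:
--         out.append(" ".join(words[start:c + 1]) + "\n")
--         start = c + 1
--     if start < len(words):
--         out.append(" ".join(words[start:]) + "\n")
--     return out
-- ===== Notes on version B (the rewrite author's own statement) =====
-- stated objective: alternative
-- what changed: Replaces the incremental append-and-flush accumulator loop by a two-pass index-then-slice structure: first collect all cut indices, then slice the word list into chunks along them.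
import Mathlib
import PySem

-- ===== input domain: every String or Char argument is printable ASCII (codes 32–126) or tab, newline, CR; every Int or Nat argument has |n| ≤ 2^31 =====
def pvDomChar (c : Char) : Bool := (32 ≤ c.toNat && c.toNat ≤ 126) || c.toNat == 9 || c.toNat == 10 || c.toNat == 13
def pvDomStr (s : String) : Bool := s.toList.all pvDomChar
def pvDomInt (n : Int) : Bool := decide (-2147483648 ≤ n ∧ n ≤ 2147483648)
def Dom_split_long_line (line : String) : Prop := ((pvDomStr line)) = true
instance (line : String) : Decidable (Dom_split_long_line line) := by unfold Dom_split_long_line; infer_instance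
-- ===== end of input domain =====

-- B replaces A's append-and-flush accumulator loop by a two-pass structure (collect cut
-- indices, then slice into chunks); same cost, alternative decomposition.

-- module constant: the dict of codes (only its keys matter to split_long_line)
def VOO_info_codes : PySem.Dict String String := PySem.Dict.ofList
  [("VS", "VOOsport"), ("w VS", "VOOsport World"), ("Pa", "Bouquet Panorama"),
   ("Ci", "Option Ciné Pass"), ("Doc", "Be Bouquet Documentaires"),
   ("Div", "Be Bouquet Divertissement"), ("Co", "Be Cool"), ("Enf", "Be Bouquet Enfant"),
   ("Sp", "Be Bouquet Sport"), ("Sel", "Be Bouquet Selection"), ("Inf", "Option Infos"),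
   ("Sen", "Option Sensation"), ("Ch", "Option Charme"), ("FF", "Family Fun"),
   ("DM", "Discover More"), ("CX", "Classé X"), ("MX", "Man-X"), ("B", "Bruxelles"),
   ("G", "Comm. German"), ("W", "Wallonie")]

-- the boundary test 'word in codes and i+1 < len(words) and words[i+1] not in codes',
-- the identical sub-expression of both Pythons (pyGet? is guarded, so the getD "" is
-- only reached where Python evaluates words[i+1]; exact)
def sllCond (words : List String) (i : Int) (word : String) : Bool :=
  VOO_info_codes.contains word &&
    (decide (i + 1 < (words.length : Int)) &&
      !VOO_info_codes.contains ((PySem.List.pyGet? words (i + 1)).getD ""))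

-- ===== PORT A =====
def split_long_line (line : String) : List String :=
  let words := PySem.Str.split₀ line
  let st := (PySem.List.enumerate words 0).foldl
    (fun (st : List String × List String) (iw : Int × String) =>
      let current_line := st.2 ++ [iw.2]
      if sllCond words iw.1 iw.2
      then (st.1 ++ [PySem.Str.join " " current_line ++ "\n"], [])
      else (st.1, current_line))
    ([], [])
  if st.2 ≠ [] then st.1 ++ [PySem.Str.join " " st.2 ++ "\n"] else st.1

-- ===== PORT B =====
-- second pass of Source B: walk the cut indices, slicing consecutive chunks
def sllGo (words : List String) (start : Int) : List Int → List String
  | [] => if start < (words.length : Int)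
          then [PySem.Str.join " " (PySem.List.slice words (some start) none) ++ "\n"]
          else []
  | c :: cs =>
      (PySem.Str.join " " (PySem.List.slice words (some start) (some (c + 1))) ++ "\n")
        :: sllGo words (c + 1) cs

def split_long_line_alt (line : String) : List String :=
  let words := PySem.Str.split₀ line
  let cuts := (PySem.List.enumerate words 0).filterMap
    (fun iw => if sllCond words iw.1 iw.2 then some iw.1 else none)
  sllGo words 0 cuts

-- ===== PRECONDITION & SPEC =====
def Spec_split_long_line (line : String) (out : List String) : Prop := out = split_long_line_alt line
instance (line : String) (out : List String) : Decidable (Spec_split_long_line line out) := by unfold Spec_split_long_line; infer_instance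

-- ===== CLAIM (what is proved, stated in full; the proofs are below) =====
def Claim_equal_split_long_line : Prop := ∀ (line : String), Dom_split_long_line line → Spec_split_long_line line (split_long_line line)

-- ===== LEMMAS AND PROOFS =====

-- reference decomposition: the boundary predicate at a word, given the words after it
def pvPred (w : String) (rest : List String) : Bool :=
  VOO_info_codes.contains w &&
    match rest with
    | [] => false
    | x :: _ => !VOO_info_codes.contains x

-- reference chunking of the word list at boundary positions
def pvChunks : List String → List (List String)
  | [] => []
  | w :: ws =>
    if pvPred w ws then [w] :: pvChunks ws
    else match pvChunks ws with
      | [] => [[w]]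
      | c :: cs => (w :: c) :: cs

def pvF (c : List String) : String := PySem.Str.join " " c ++ "\n"

def pvMerge (cur : List String) : List (List String) → List (List String)
  | [] => if cur = [] then [] else [cur]
  | c :: cs => (cur ++ c) :: cs

theorem pvMerge_nil (chs : List (List String)) : pvMerge [] chs = chs := by
  cases chs <;> simp [pvMerge]

theorem pvMerge_step (cur : List String) (w : String) (rest : List String)
    (h : pvPred w rest = false) :
    pvMerge (cur ++ [w]) (pvChunks rest) = pvMerge cur (pvChunks (w :: rest)) := by
  rw [pvChunks, if_neg (by simp [h])]
  cases hc : pvChunks rest <;> simp [pvMerge]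

-- the ports' condition equals the reference predicate, at the true position
theorem sllCond_eq (words : List String) (j : Nat) (w : String) (rest : List String)
    (hj : words.drop j = w :: rest) :
    sllCond words (j : Int) w = pvPred w rest := by
  have hlen : words.length = j + 1 + rest.length := by
    have := congrArg List.length hj
    simp [List.length_drop] at this
    omega
  have hget : words[j+1]? = rest.head? := by
    have h1 : (words.drop j)[1]? = words[j + 1]? := by
      rw [List.getElem?_drop]
    rw [← h1, hj]
    cases rest <;> simp
  cases rest with
  | nil =>
    have : ¬ ((j : Int) + 1 < (words.length : Int)) := by
      simp only [List.length_nil] at hlen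
      push_cast [hlen]; omega
    simp [sllCond, pvPred, this]
  | cons x xs =>
    have hlt : (j : Int) + 1 < (words.length : Int) := by
      simp only [List.length_cons] at hlen
      push_cast [hlen]; omega
    have : PySem.List.pyGet? words ((j : Int) + 1) = some x := by
      have : ((j : Int) + 1) = ((j + 1 : Nat) : Int) := by push_cast; ring
      rw [this, PySem.List.pyGet?_natCast, hget]
      simp
    simp [sllCond, pvPred, hlt, this]

-- chunk slicing: words[start:j+1] = words[start:j] ++ [w] when words[j] = w
theorem slice_snoc (words : List String) (start j : Nat) (w : String) (rest : List String)
    (hj : words.drop j = w :: rest) (hs : start ≤ j) :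
    PySem.List.slice words (some (j : Int)) (some ((j : Int) + 1)) =
      [w] ∧
    PySem.List.slice words (some (start : Int)) (some (((j : Nat) : Int) + 1)) =
      PySem.List.slice words (some (start : Int)) (some ((j : Nat) : Int)) ++ [w] := by
  have hcast : ((j : Nat) : Int) + 1 = ((j + 1 : Nat) : Int) := by push_cast; ring
  have hgetw : words[j]? = some w := by
    have h0 : (words.drop j)[0]? = words[j + 0]? := by rw [List.getElem?_drop]
    simp [hj] at h0
    simpa using h0.symm
  constructor
  · rw [hcast, PySem.List.slice_natCast]
    have : (j + 1) - j = 1 := by omega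
    rw [this]
    rw [hj]
    simp
  · rw [hcast, PySem.List.slice_natCast, PySem.List.slice_natCast]
    have h1 : (j + 1) - start = (j - start) + 1 := by omega
    rw [h1, List.take_add_one]
    congr 1
    have : (words.drop start)[j - start]? = words[start + (j - start)]? := by
      rw [List.getElem?_drop]
    have h2 : start + (j - start) = j := by omega
    rw [h2] at this
    rw [this, hgetw]
    rfl

-- A's loop, finalized, computes the mapped merge of the pending chunk with pvChunks
theorem loopA (words : List String) (suf : List String) :
    ∀ (j : Nat), words.drop j = suf → ∀ (nl cur : List String),
    (let st := (PySem.List.enumerate suf (j : Int)).foldl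
        (fun (st : List String × List String) (iw : Int × String) =>
          let current_line := st.2 ++ [iw.2]
          if sllCond words iw.1 iw.2
          then (st.1 ++ [PySem.Str.join " " current_line ++ "\n"], [])
          else (st.1, current_line))
        (nl, cur)
      if st.2 ≠ [] then st.1 ++ [PySem.Str.join " " st.2 ++ "\n"] else st.1)
    = nl ++ (pvMerge cur (pvChunks suf)).map pvF := by
  induction suf with
  | nil =>
    intro j hj nl cur
    cases cur <;> simp [PySem.List.enumerate_nil, pvChunks, pvMerge, pvF]
  | cons w rest ih =>
    intro j hj nl cur
    have hdrop : words.drop (j + 1) = rest := by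
      have : words.drop (j+1) = (words.drop j).tail := by
        rw [← List.drop_drop]; simp
      rw [this, hj]; rfl
    rw [PySem.List.enumerate_cons]
    simp only [List.foldl_cons]
    rw [sllCond_eq words j w rest hj]
    by_cases hp : pvPred w rest = true
    · rw [if_pos hp]
      have hcast : ((j : Int) + 1) = ((j + 1 : Nat) : Int) := by push_cast; ring
      rw [hcast]
      have := ih (j + 1) hdrop (nl ++ [PySem.Str.join " " (cur ++ [w]) ++ "\n"]) []
      simp only at this ⊢
      rw [this, pvMerge_nil]
      rw [pvChunks, if_pos hp]
      simp [pvMerge, pvF]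
    · rw [if_neg hp]
      simp only [Bool.not_eq_true] at hp
      have hcast : ((j : Int) + 1) = ((j + 1 : Nat) : Int) := by push_cast; ring
      rw [hcast]
      have := ih (j + 1) hdrop nl (cur ++ [w])
      simp only at this ⊢
      rw [this, pvMerge_step cur w rest hp]

-- B's second pass over the cut indices of the suffix computes the same merge
theorem loopB (words : List String) (suf : List String) :
    ∀ (j : Nat), words.drop j = suf → ∀ (start : Nat), start ≤ j →
    sllGo words (start : Int)
        ((PySem.List.enumerate suf (j : Int)).filterMap
          (fun iw => if sllCond words iw.1 iw.2 then some iw.1 else none))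
      = (pvMerge (PySem.List.slice words (some (start : Int)) (some ((j : Nat) : Int)))
          (pvChunks suf)).map pvF := by
  induction suf with
  | nil =>
    intro j hj start hs
    have hlen : words.length ≤ j := by
      have := congrArg List.length hj
      simp [List.length_drop] at this
      omega
    rw [PySem.List.enumerate_nil]
    simp only [List.filterMap_nil]
    have hslice : PySem.List.slice words (some (start : Int)) (some ((j : Nat) : Int))
        = words.drop start := by
      rw [PySem.List.slice_natCast]
      apply List.take_of_length_le
      simp [List.length_drop]; omega
    by_cases hne : start < words.length
    · have hdz : words.drop start ≠ [] := by
        rw [← List.length_pos_iff, List.length_drop]; omega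
      rw [sllGo, if_pos (by exact_mod_cast hne)]
      rw [PySem.List.slice_from_natCast]
      rw [hslice, pvChunks]
      simp [pvMerge, hdz, pvF]
    · have hdz : words.drop start = [] := by
        apply List.drop_eq_nil_of_le; omega
      rw [sllGo, if_neg (by omega)]
      rw [hslice, hdz, pvChunks]
      simp [pvMerge]
  | cons w rest ih =>
    intro j hj start hs
    have hdrop : words.drop (j + 1) = rest := by
      have : words.drop (j+1) = (words.drop j).tail := by
        rw [← List.drop_drop]; simp
      rw [this, hj]; rfl
    obtain ⟨hsl1, hsl2⟩ := slice_snoc words start j w rest hj hs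
    rw [PySem.List.enumerate_cons]
    simp only [List.filterMap_cons]
    rw [sllCond_eq words j w rest hj]
    have hcast : ((j : Int) + 1) = ((j + 1 : Nat) : Int) := by push_cast; ring
    by_cases hp : pvPred w rest = true
    · rw [if_pos hp]
      rw [sllGo]
      rw [hcast]
      rw [ih (j + 1) hdrop (j + 1) (le_refl _)]
      have hsl3 : PySem.List.slice words (some ((j + 1 : Nat) : Int)) (some ((j + 1 : Nat) : Int)) = [] := by
        rw [PySem.List.slice_natCast]; simp
      rw [hsl3, pvMerge_nil]
      rw [pvChunks, if_pos hp]
      simp only [pvMerge, List.map_cons]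
      rw [hcast] at hsl2
      rw [hsl2]
      rfl
    · rw [if_neg hp]
      simp only [Bool.not_eq_true] at hp
      rw [hcast]
      rw [ih (j + 1) hdrop start (by omega)]
      rw [hcast] at hsl2
      rw [← pvMerge_step _ w rest hp, ← hsl2]

-- ===== VERDICT (by name: the statement is the Claim_ definition above) =====
theorem split_long_line_spec : Claim_equal_split_long_line := by
  intro line _hdom
  unfold Spec_split_long_line split_long_line split_long_line_alt
  set words := PySem.Str.split₀ line with hw
  have hA := loopA words words 0 (by simp) [] []
  have hB := loopB words words 0 (by simp) 0 (le_refl 0)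
  simp only at hA hB
  rw [show ((0 : Nat) : Int) = (0 : Int) from rfl] at hA hB
  rw [hA, hB]
  have : PySem.List.slice words (some (0 : Int)) (some (0 : Int)) = [] := by
    rw [show (0:Int) = ((0:Nat):Int) from rfl, PySem.List.slice_natCast]; simp
  rw [this, pvMerge_nil]
  simp
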